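-- pv_equiv track=rewrite | github.com/Mart1n66/school | python/fundamentals/rekurzia.3.py | F
-- ===== SOURCE A (Python) =====
-- def F(ret,x):
--     if len(ret) == 1:
--         if ret == x:
--             return True
--         else:
--             return False
--     else:
--         if ret[-1] == x:
--             return True
--         else:
--             return F(ret[0:-1],x)
-- ===== SOURCE B (Python) =====
-- def F(ret, x):
--     # True iff some element of ret equals x; single forward scan.
--     return any(c == x for c in ret)
-- ===== Notes on version B (the rewrite author's own statement) =====
-- stated objective: faster
-- what changed: Replaces A's back-to-front recursion, which copies an O(n) slice at every step, by a single forward any() scan over the elements; A's length-1 base case compares the whole 1-element slice to x, which is the same element comparison, so values agree everywhere A returns.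
-- crash fix: On empty ret A raises IndexError (ret[-1] on '' after the len==1 test fails); B returns False (no element equals x). — e.g. on F("", "a"): A raises IndexError, B returns false
import Mathlib
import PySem

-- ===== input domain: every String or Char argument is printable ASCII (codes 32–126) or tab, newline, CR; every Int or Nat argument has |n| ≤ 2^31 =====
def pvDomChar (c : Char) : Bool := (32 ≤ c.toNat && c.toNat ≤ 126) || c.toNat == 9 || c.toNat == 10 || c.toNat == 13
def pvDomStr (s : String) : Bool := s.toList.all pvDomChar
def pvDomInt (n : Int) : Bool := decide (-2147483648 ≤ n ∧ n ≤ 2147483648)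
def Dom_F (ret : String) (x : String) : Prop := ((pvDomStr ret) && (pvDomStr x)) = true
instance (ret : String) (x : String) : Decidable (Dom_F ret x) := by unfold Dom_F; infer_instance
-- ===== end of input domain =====

-- B replaces A's back-to-front recursion with repeated slicing by a single forward any-scan (simpler).
-- On empty ret A raises IndexError; B returns False (see Raises_F).


-- ===== PORT A =====
-- A recurses on ret, testing ret[-1] and then recursing on ret[0:-1]; we transcribe this on the
-- REVERSED character list, where ret[-1] is the head and ret[0:-1] is the tail. The length-1 base
-- case compares the whole 1-char string to x. The [] case is unreachable under Pre_F
-- (Python raises IndexError there).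
def FrecA (x : String) : List Char → Bool
  | [] => false
  | [c] => String.ofList [c] == x
  | c :: d :: rest => if String.ofList [c] == x then true else FrecA x (d :: rest)

def F (ret : String) (x : String) : Bool := FrecA x ret.toList.reverse

-- ===== PORT B =====
-- any(c == x for c in ret): a single forward scan over the characters (each yielded as a 1-char string).
def F_alt (ret : String) (x : String) : Bool :=
  ret.toList.any (fun c => String.ofList [c] == x)

-- ===== PRECONDITION & SPEC =====
-- Pre_F excludes only the empty string, on which A raises IndexError.
def Pre_F (ret : String) (x : String) : Prop := ret ≠ ""
instance (ret : String) (x : String) : Decidable (Pre_F ret x) := by unfold Pre_F; infer_instance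
def pvWitness_F : String × String := ("a", "a")

-- On empty ret A raises IndexError (ret[-1] on ''); B returns False (no element equals x).
def Raises_F (ret : String) (x : String) : Prop := ret = ""
instance (ret : String) (x : String) : Decidable (Raises_F ret x) := by unfold Raises_F; infer_instance
def pvRaiseWitness_F : String × String := ("", "a")
def pvRaiseWitnessOut_F : Bool := false

def Spec_F (ret : String) (x : String) (out : Bool) : Prop := out = F_alt ret x
instance (ret : String) (x : String) (out : Bool) : Decidable (Spec_F ret x out) := by unfold Spec_F; infer_instance

-- ===== CLAIM (what is proved, stated in full; the proofs are below) =====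
def Claim_equal_F : Prop := ∀ (ret : String) (x : String), Dom_F ret x → Pre_F ret x → Spec_F ret x (F ret x)
-- Claim_raises_F is discharged at the bottom (F_raises).
def Claim_raises_F : Prop := (∀ (ret : String) (x : String), Dom_F ret x → Raises_F ret x → ¬ Pre_F ret x) ∧ (Dom_F (pvRaiseWitness_F.1) (pvRaiseWitness_F.2) ∧ Raises_F (pvRaiseWitness_F.1) (pvRaiseWitness_F.2) ∧ F_alt (pvRaiseWitness_F.1) (pvRaiseWitness_F.2) = pvRaiseWitnessOut_F)

-- ===== LEMMAS AND PROOFS =====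
theorem FrecA_eq_any (x : String) (m : List Char) (hm : m ≠ []) :
    FrecA x m = m.any (fun c => String.ofList [c] == x) := by
  induction m with
  | nil => exact absurd rfl hm
  | cons c rest ih =>
    cases rest with
    | nil => simp [FrecA]
    | cons d rest' =>
      by_cases h : (String.ofList [c] == x) = true
      · simp [FrecA, h]
      · simp only [FrecA, List.any_cons]
        rw [if_neg h, ih (by simp)]
        simp [Bool.eq_false_iff.mpr h]

-- ===== VERDICT (by name: the statement is the Claim_ definition above) =====
theorem F_spec : Claim_equal_F := by
  intro ret x _ hpre
  unfold Spec_F F F_alt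
  rw [FrecA_eq_any]
  · exact List.any_reverse ..
  · simpa using hpre

def F_raises : Claim_raises_F := by
  unfold Claim_raises_F
  exact ⟨fun ret x _ hr hp => hp hr, by decide⟩
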